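-- pv_equiv track=rewrite | github.com/iwataka/atcoder | beginner/095/static-sushi.py | create_accs
-- ===== SOURCE A (Python) =====
-- def create_accs(sushis, c, cw):
--     maxs, vs_ret = [], []
--     v_sum, v_max = 0, 0
--     for d, v in sushis:
--         v_sum += v
--         dist = d if cw else c - d
--         v_cur = v_sum - dist
--         if v_max < v_cur:
--             v_max = v_cur
--         maxs.append(v_max)
--         vs_ret.append(v_sum - dist*2)
--     return maxs, vs_ret
-- ===== SOURCE B (Python) =====
-- def create_accs(sushis, c, cw):
--     # divide and conquer: solve each half, threading (running sum, running max) across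
--     def go(seg, s, m):
--         if not seg:
--             return [], [], s, m
--         if len(seg) == 1:
--             d, v = seg[0]
--             s += v
--             dist = d if cw else c - d
--             m = max(m, s - dist)
--             return [m], [s - 2 * dist], s, m
--         mid = len(seg) // 2
--         ml, vl, s, m = go(seg[:mid], s, m)
--         mr, vr, s, m = go(seg[mid:], s, m)
--         return ml + mr, vl + vr, s, m
--     maxs, vs_ret, _, _ = go(sushis, 0, 0)
--     return maxs, vs_ret
-- ===== Notes on version B (the rewrite author's own statement) =====
-- stated objective: alternative
-- what changed: Replaces A's single linear fold with a divide-and-conquer recursion that solves each half of the list and threads the (running sum, running max) state from the left half into the right, concatenating the halves' outputs.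
import Mathlib
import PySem

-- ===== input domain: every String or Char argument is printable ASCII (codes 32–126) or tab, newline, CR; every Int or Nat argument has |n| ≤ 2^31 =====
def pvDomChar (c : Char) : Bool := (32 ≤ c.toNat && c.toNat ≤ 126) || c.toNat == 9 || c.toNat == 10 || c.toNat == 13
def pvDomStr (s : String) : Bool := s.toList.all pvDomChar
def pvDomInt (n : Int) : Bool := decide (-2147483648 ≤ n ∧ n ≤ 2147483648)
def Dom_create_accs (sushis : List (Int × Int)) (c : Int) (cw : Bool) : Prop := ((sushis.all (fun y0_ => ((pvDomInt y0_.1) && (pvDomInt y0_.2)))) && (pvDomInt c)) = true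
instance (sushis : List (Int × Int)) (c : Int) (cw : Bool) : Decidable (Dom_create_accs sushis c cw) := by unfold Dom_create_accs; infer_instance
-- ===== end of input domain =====

-- B replaces A's single linear fold by a divide-and-conquer recursion on halves,
-- threading the (running sum, running max) state left-to-right; objective: alternative.

-- ===== PORT A =====
-- one fold carrying (v_sum, v_max, maxs, vs_ret), exactly A's loop
def create_accs (sushis : List (Int × Int)) (c : Int) (cw : Bool) : List Int × List Int :=
  let st := sushis.foldl
    (fun (st : Int × Int × List Int × List Int) dv =>
      let v_sum := st.1 + dv.2
      let dist := if cw then dv.1 else c - dv.1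
      let v_cur := v_sum - dist
      let v_max := if st.2.1 < v_cur then v_cur else st.2.1
      (v_sum, v_max, st.2.2.1 ++ [v_max], st.2.2.2 ++ [v_sum - dist * 2]))
    (0, 0, [], [])
  (st.2.2.1, st.2.2.2)

-- ===== PORT B =====
-- Source B's inner helper `go`: divide and conquer on the segment, result = (maxs, vs, final sum, final max)
def goB (c : Int) (cw : Bool) : List (Int × Int) → Int → Int → List Int × List Int × Int × Int
  | [], s, m => ([], [], s, m)
  | [dv], s, m =>
      let s' := s + dv.2
      let dist := if cw then dv.1 else c - dv.1
      let m' := max m (s' - dist)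
      ([m'], [s' - 2 * dist], s', m')
  | a :: b :: t, s, m =>
      let mid := (a :: b :: t).length / 2
      let L := goB c cw ((a :: b :: t).take mid) s m
      let R := goB c cw ((a :: b :: t).drop mid) L.2.2.1 L.2.2.2
      (L.1 ++ R.1, L.2.1 ++ R.2.1, R.2.2.1, R.2.2.2)
  termination_by l _ _ => l.length
  decreasing_by
    · simp [List.length_take]; omega
    · simp; omega

def create_accs_alt (sushis : List (Int × Int)) (c : Int) (cw : Bool) : List Int × List Int :=
  let r := goB c cw sushis 0 0
  (r.1, r.2.1)

-- ===== PRECONDITION & SPEC =====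
def Spec_create_accs (sushis : List (Int × Int)) (c : Int) (cw : Bool) (out : List Int × List Int) : Prop := out = create_accs_alt sushis c cw
instance (sushis : List (Int × Int)) (c : Int) (cw : Bool) (out : List Int × List Int) : Decidable (Spec_create_accs sushis c cw out) := by unfold Spec_create_accs; infer_instance

-- ===== CLAIM (what is proved, stated in full; the proofs are below) =====
def Claim_equal_create_accs : Prop := ∀ (sushis : List (Int × Int)) (c : Int) (cw : Bool), Dom_create_accs sushis c cw → Spec_create_accs sushis c cw (create_accs sushis c cw)

-- ===== LEMMAS AND PROOFS =====

-- linear reference: process the list left to right, same 4-tuple as goB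
def linF (c : Int) (cw : Bool) : List (Int × Int) → Int → Int → List Int × List Int × Int × Int
  | [], s, m => ([], [], s, m)
  | dv :: r, s, m =>
      let s' := s + dv.2
      let dist := if cw then dv.1 else c - dv.1
      let m' := max m (s' - dist)
      let rest := linF c cw r s' m'
      (m' :: rest.1, (s' - 2 * dist) :: rest.2.1, rest.2.2)

theorem linF_append (c : Int) (cw : Bool) :
    ∀ (l₁ l₂ : List (Int × Int)) (s m : Int),
    linF c cw (l₁ ++ l₂) s m =
      (let L := linF c cw l₁ s m
       let R := linF c cw l₂ L.2.2.1 L.2.2.2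
       (L.1 ++ R.1, L.2.1 ++ R.2.1, R.2.2.1, R.2.2.2)) := by
  intro l₁
  induction l₁ with
  | nil => intro l₂ s m; simp [linF]
  | cons dv r ih => intro l₂ s m; simp [linF, ih]

theorem goB_eq_linF (c : Int) (cw : Bool) :
    ∀ (n : Nat) (l : List (Int × Int)) (s m : Int), l.length ≤ n →
    goB c cw l s m = linF c cw l s m := by
  intro n
  induction n with
  | zero =>
      intro l s m h
      have : l = [] := List.length_eq_zero_iff.mp (Nat.le_zero.mp h)
      subst this; simp [goB, linF]
  | succ k ih =>
      intro l s m h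
      match l with
      | [] => simp [goB, linF]
      | [dv] => simp [goB, linF]
      | a :: b :: t =>
          have hlen : (a :: b :: t).length = t.length + 2 := by simp
          have hmid : (a :: b :: t).length / 2 ≥ 1 ∧ (a :: b :: t).length / 2 < (a :: b :: t).length := by
            omega
          rw [goB]
          have h1 : ((a :: b :: t).take ((a :: b :: t).length / 2)).length ≤ k := by
            simp only [List.length_take]
            simp at h; omega
          have h2 : ((a :: b :: t).drop ((a :: b :: t).length / 2)).length ≤ k := by
            simp only [List.length_drop]
            simp at h ⊢; omega
          rw [ih _ _ _ h1, ih _ _ _ h2]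
          have := linF_append c cw ((a :: b :: t).take ((a :: b :: t).length / 2))
            ((a :: b :: t).drop ((a :: b :: t).length / 2)) s m
          rw [List.take_append_drop] at this
          rw [this]

-- A's fold equals the linear reference
theorem foldA_eq_linF (c : Int) (cw : Bool) :
    ∀ (l : List (Int × Int)) (s m : Int) (ma va : List Int),
    (l.foldl
      (fun (st : Int × Int × List Int × List Int) dv =>
        let v_sum := st.1 + dv.2
        let dist := if cw then dv.1 else c - dv.1
        let v_cur := v_sum - dist
        let v_max := if st.2.1 < v_cur then v_cur else st.2.1
        (v_sum, v_max, st.2.2.1 ++ [v_max], st.2.2.2 ++ [v_sum - dist * 2]))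
      (s, m, ma, va))
    = ((linF c cw l s m).2.2.1, (linF c cw l s m).2.2.2,
       ma ++ (linF c cw l s m).1, va ++ (linF c cw l s m).2.1) := by
  intro l
  induction l with
  | nil => intro s m ma va; simp [linF]
  | cons dv r ih =>
      intro s m ma va
      simp only [List.foldl_cons]
      rw [ih]
      have hmax : (if m < s + dv.2 - (if cw then dv.1 else c - dv.1)
          then s + dv.2 - (if cw then dv.1 else c - dv.1) else m)
          = max m (s + dv.2 - (if cw then dv.1 else c - dv.1)) := by
        split_ifs <;> omega
      have harith : s + dv.2 - (if cw then dv.1 else c - dv.1) * 2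
          = s + dv.2 - 2 * (if cw then dv.1 else c - dv.1) := by ring
      simp only [linF, hmax, harith]
      simp

-- ===== VERDICT (by name: the statement is the Claim_ definition above) =====
theorem create_accs_spec : Claim_equal_create_accs := by
  intro sushis c cw _
  unfold Spec_create_accs create_accs create_accs_alt
  rw [goB_eq_linF c cw sushis.length sushis 0 0 le_rfl,
      foldA_eq_linF c cw sushis 0 0 [] []]
  simp
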